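-- pv_equiv track=rewrite | github.com/HacvaVang/carcassonne_AI | src/region.py | _positions_touch
-- ===== SOURCE A (Python) =====
-- def _positions_touch(pos_a, pos_b):
--     # Defines tile-local adjacency of edge/corner positions
--     adjacent = {
--         0: {1, 7},
--         1: {0, 2},
--         2: {1, 3},
--         3: {2, 4},
--         4: {3, 5},
--         5: {4, 6},
--         6: {5, 7},
--         7: {6, 0},
--         8: set(range(0, 8)),
--     }
--     for a in pos_a:
--         for b in pos_b:
--             if b in adjacent.get(a, set()) or a in adjacent.get(b, set()):
--                 return True
--     return False
-- ===== SOURCE B (Python) =====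
-- # B: bitmask index -- OR together the neighbor bitmasks of pos_a, then test pos_b bits; no dict, no sets.
-- _NEIGH = (386, 261, 266, 276, 296, 336, 416, 321, 255)
--
-- def _positions_touch(pos_a, pos_b):
--     mask = 0
--     for a in pos_a:
--         if 0 <= a <= 8:
--             mask |= _NEIGH[a]
--     for b in pos_b:
--         if 0 <= b <= 8 and (mask >> b) & 1:
--             return True
--     return False
-- ===== Notes on version B (the rewrite author's own statement) =====
-- stated objective: faster
-- what changed: A runs a nested loop over all (a,b) pairs with a two-way membership check in an asymmetric dict of sets; B replaces the dict and sets entirely with a 9-entry tuple of integer bitmasks, ORs the masks of pos_a into one accumulator, and then tests single bits for pos_b.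
import Mathlib
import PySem

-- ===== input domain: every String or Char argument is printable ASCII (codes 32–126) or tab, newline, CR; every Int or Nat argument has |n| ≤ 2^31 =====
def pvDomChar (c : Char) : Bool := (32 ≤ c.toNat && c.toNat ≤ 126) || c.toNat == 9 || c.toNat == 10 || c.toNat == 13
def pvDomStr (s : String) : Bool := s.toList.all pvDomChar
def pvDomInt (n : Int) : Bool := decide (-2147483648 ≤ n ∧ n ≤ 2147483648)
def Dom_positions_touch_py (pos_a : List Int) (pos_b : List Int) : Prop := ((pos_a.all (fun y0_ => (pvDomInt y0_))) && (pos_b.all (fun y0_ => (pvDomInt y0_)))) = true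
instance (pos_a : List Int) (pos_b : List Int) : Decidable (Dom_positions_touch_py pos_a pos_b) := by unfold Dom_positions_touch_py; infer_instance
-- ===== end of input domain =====

-- ===== PORT A =====
-- A: nested loop over all (a, b) pairs, two-way lookup in the asymmetric adjacency dict of sets.
def pvAdj : PySem.Dict Int (PySem.Set Int) :=
  PySem.Dict.ofList [
    (0, PySem.Set.ofList [1, 7]), (1, PySem.Set.ofList [0, 2]), (2, PySem.Set.ofList [1, 3]),
    (3, PySem.Set.ofList [2, 4]), (4, PySem.Set.ofList [3, 5]), (5, PySem.Set.ofList [4, 6]),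
    (6, PySem.Set.ofList [5, 7]), (7, PySem.Set.ofList [6, 0]),
    (8, PySem.Set.ofList [0, 1, 2, 3, 4, 5, 6, 7])]

def positions_touch_py (pos_a : List Int) (pos_b : List Int) : Bool :=
  pos_a.any (fun a => pos_b.any (fun b =>
    PySem.Set.contains (pvAdj.getD a PySem.Set.empty) b ||
    PySem.Set.contains (pvAdj.getD b PySem.Set.empty) a))

-- ===== PORT B =====
-- B: bitmask index — OR together the per-position neighbor bitmasks of pos_a, then test pos_b's bits.
def pvNeigh : List Nat := [386, 261, 266, 276, 296, 336, 416, 321, 255]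

def positions_touch_py_alt (pos_a : List Int) (pos_b : List Int) : Bool :=
  let mask : Nat := pos_a.foldl
    (fun m a => if 0 ≤ a ∧ a ≤ 8 then m ||| pvNeigh.getD a.toNat 0 else m) 0
  pos_b.any (fun b => decide (0 ≤ b ∧ b ≤ 8) && ((mask >>> b.toNat) &&& 1 == 1))

-- ===== PRECONDITION & SPEC =====
def Spec_positions_touch_py (pos_a : List Int) (pos_b : List Int) (out : Bool) : Prop := out = positions_touch_py_alt pos_a pos_b
instance (pos_a : List Int) (pos_b : List Int) (out : Bool) : Decidable (Spec_positions_touch_py pos_a pos_b out) := by unfold Spec_positions_touch_py; infer_instance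

-- ===== CLAIM (what is proved, stated in full; the proofs are below) =====
def Claim_equal_positions_touch_py : Prop := ∀ (pos_a : List Int) (pos_b : List Int), Dom_positions_touch_py pos_a pos_b → Spec_positions_touch_py pos_a pos_b (positions_touch_py pos_a pos_b)

-- ===== LEMMAS AND PROOFS =====

-- Python's truthiness test on (mask >> b) & 1 is testBit
lemma pvBit_eq_testBit (m k : Nat) : ((m >>> k) &&& 1 == 1) = m.testBit k := by
  simp [Nat.testBit, Nat.and_one_is_mod, Nat.one_and_eq_mod_two]

-- out-of-range keys hit the empty default in A's table
lemma pvAdj_out (a : Int) (ha : a < 0 ∨ 8 < a) : pvAdj.getD a PySem.Set.empty = PySem.Set.empty := by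
  simp [pvAdj, PySem.Dict.ofList, PySem.Dict.update, List.foldl, PySem.Dict.getD_insert,
    PySem.Dict.getD_empty]
  split_ifs <;> first | rfl | omega

-- pointwise bridge: A's two-way dict relation equals B's bitmask relation
lemma pv_pointwise (a b : Int) :
    (b ∈ pvAdj.getD a PySem.Set.empty ∨ a ∈ pvAdj.getD b PySem.Set.empty) ↔
      ((0 ≤ a ∧ a ≤ 8) ∧ (0 ≤ b ∧ b ≤ 8) ∧ (pvNeigh.getD a.toNat 0).testBit b.toNat) := by
  by_cases ha : 0 ≤ a ∧ a ≤ 8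
  · by_cases hb : 0 ≤ b ∧ b ≤ 8
    · obtain ⟨ha1, ha2⟩ := ha; obtain ⟨hb1, hb2⟩ := hb
      interval_cases a <;> interval_cases b <;> simp <;> decide
    · have hb' : b < 0 ∨ 8 < b := by omega
      obtain ⟨ha1, ha2⟩ := ha
      rw [pvAdj_out b hb']
      constructor
      · rintro (h | h)
        · exfalso; revert h
          interval_cases a <;>
            simp [pvAdj, PySem.Dict.ofList, PySem.Dict.update, List.foldl,
              PySem.Dict.getD_insert, PySem.Set.mem_ofList] <;> omega
        · exfalso; revert h; simp [PySem.Set.empty]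
      · rintro ⟨_, hb2, _⟩; omega
  · have ha' : a < 0 ∨ 8 < a := by omega
    rw [pvAdj_out a ha']
    constructor
    · rintro (h | h)
      · exfalso; revert h; simp [PySem.Set.empty]
      · exfalso
        by_cases hb : 0 ≤ b ∧ b ≤ 8
        · obtain ⟨hb1, hb2⟩ := hb
          revert h
          interval_cases b <;>
            simp [pvAdj, PySem.Dict.ofList, PySem.Dict.update, List.foldl,
              PySem.Dict.getD_insert, PySem.Set.mem_ofList] <;> omega
        · have hb' : b < 0 ∨ 8 < b := by omega
          rw [pvAdj_out b hb'] at h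
          revert h; simp [PySem.Set.empty]
    · rintro ⟨ha2, _, _⟩; omega

-- a bit of the accumulated mask is a bit of the accumulator or of some admitted position's mask
lemma pv_maskBit (pos_a : List Int) (m : Nat) (k : Nat) :
    (pos_a.foldl (fun m a => if 0 ≤ a ∧ a ≤ 8 then m ||| pvNeigh.getD a.toNat 0 else m) m).testBit k ↔
      m.testBit k ∨ ∃ a ∈ pos_a, (0 ≤ a ∧ a ≤ 8) ∧ (pvNeigh.getD a.toNat 0).testBit k := by
  induction pos_a generalizing m with
  | nil => simp
  | cons x xs ih =>
    simp only [List.foldl_cons, ih, List.mem_cons]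
    by_cases hx : 0 ≤ x ∧ x ≤ 8
    · simp only [if_pos hx, Nat.testBit_or, Bool.or_eq_true]
      constructor
      · rintro ((h | h) | ⟨a, haa, hr, h⟩)
        · exact Or.inl h
        · exact Or.inr ⟨x, Or.inl rfl, hx, h⟩
        · exact Or.inr ⟨a, Or.inr haa, hr, h⟩
      · rintro (h | ⟨a, (rfl | haa), hr, h⟩)
        · exact Or.inl (Or.inl h)
        · exact Or.inl (Or.inr h)
        · exact Or.inr ⟨a, haa, hr, h⟩
    · simp only [if_neg hx]
      constructor
      · rintro (h | ⟨a, haa, hr, h⟩)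
        · exact Or.inl h
        · exact Or.inr ⟨a, Or.inr haa, hr, h⟩
      · rintro (h | ⟨a, (rfl | haa), hr, h⟩)
        · exact Or.inl h
        · exact absurd hr hx
        · exact Or.inr ⟨a, haa, hr, h⟩

-- ===== VERDICT (by name: the statement is the Claim_ definition above) =====
theorem positions_touch_py_spec : Claim_equal_positions_touch_py := by
  intro pos_a pos_b _
  unfold Spec_positions_touch_py
  rw [Bool.eq_iff_iff]
  simp only [positions_touch_py, positions_touch_py_alt, List.any_eq_true, Bool.or_eq_true,
    Bool.and_eq_true, decide_eq_true_eq, PySem.Set.contains_iff, pvBit_eq_testBit]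
  constructor
  · rintro ⟨a, haa, b, hbb, hR⟩
    rcases (pv_pointwise a b).mp hR with ⟨hra, hrb, hbit⟩
    exact ⟨b, hbb, hrb, (pv_maskBit pos_a 0 b.toNat).mpr (Or.inr ⟨a, haa, hra, hbit⟩)⟩
  · rintro ⟨b, hbb, hrb, hbit⟩
    rcases (pv_maskBit pos_a 0 b.toNat).mp hbit with h | ⟨a, haa, hra, h⟩
    · simp at h
    · exact ⟨a, haa, b, hbb, (pv_pointwise a b).mpr ⟨hra, hrb, h⟩⟩
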